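-- pv_equiv track=rewrite | github.com/302tyagi-found/PYTHON-LEETCODE | #01460.py | canBeEqual
-- ===== SOURCE A (Python) =====
-- from typing import List
--
-- def canBeEqual(target: List[int], arr: List[int]) -> bool:
--     arrFreq = {}
--     for num in arr:
--         arrFreq[num] = arrFreq.get(num, 0) + 1
--
--     for num in target:
--         if num not in arrFreq:
--             return False
--
--         arrFreq[num] -= 1
--         if arrFreq[num] == 0:
--             del arrFreq[num]
--     return len(arrFreq) == 0
-- ===== SOURCE B (Python) =====
-- from typing import List
--
-- def canBeEqual(target: List[int], arr: List[int]) -> bool: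
--     return sorted(target) == sorted(arr)
-- ===== Notes on version B (the rewrite author's own statement) =====
-- stated objective: idiomatic
-- what changed: Replaced the hash-map frequency counting (build counter of arr, decrement/delete while scanning target, check emptiness) by sorting both lists into canonical order and comparing them elementwise.
import Mathlib
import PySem

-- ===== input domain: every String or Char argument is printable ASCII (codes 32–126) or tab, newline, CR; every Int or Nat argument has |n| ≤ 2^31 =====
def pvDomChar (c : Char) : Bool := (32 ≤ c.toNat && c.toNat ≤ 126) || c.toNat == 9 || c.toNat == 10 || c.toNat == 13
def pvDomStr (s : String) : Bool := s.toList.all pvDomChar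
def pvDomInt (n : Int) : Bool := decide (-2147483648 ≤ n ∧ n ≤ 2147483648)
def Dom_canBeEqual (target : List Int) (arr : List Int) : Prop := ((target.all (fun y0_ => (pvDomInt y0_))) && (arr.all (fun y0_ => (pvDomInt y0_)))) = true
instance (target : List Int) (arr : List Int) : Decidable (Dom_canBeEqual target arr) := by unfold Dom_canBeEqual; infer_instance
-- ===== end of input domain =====

-- B replaces A's frequency-dict counting by sorting both lists and comparing (idiomatic; return value only, A mutates nothing).

-- ===== PORT A =====
-- the 'for num in target' loop: lookup, decrement, delete-at-zero, early False
def canBeEqualLoop (d : PySem.Dict Int Int) : List Int → Bool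
  | [] => d.size == 0
  | num :: rest =>
    if d.contains num then
      let d2 := d.insert num (d.getD num 0 - 1)
      if d2.getD num 0 == 0 then canBeEqualLoop (d2.erase num) rest
      else canBeEqualLoop d2 rest
    else false

def canBeEqual (target : List Int) (arr : List Int) : Bool :=
  let arrFreq := arr.foldl (fun d num => d.insert num (d.getD num 0 + 1)) PySem.Dict.empty
  canBeEqualLoop arrFreq target

-- ===== PORT B =====
def canBeEqual_alt (target : List Int) (arr : List Int) : Bool :=
  PySem.List.sorted target (fun x => x) false == PySem.List.sorted arr (fun x => x) false

-- ===== PRECONDITION & SPEC =====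
def Spec_canBeEqual (target : List Int) (arr : List Int) (out : Bool) : Prop := out = canBeEqual_alt target arr
instance (target : List Int) (arr : List Int) (out : Bool) : Decidable (Spec_canBeEqual target arr out) := by unfold Spec_canBeEqual; infer_instance

-- ===== CLAIM (what is proved, stated in full; the proofs are below) =====
def Claim_equal_canBeEqual : Prop := ∀ (target : List Int) (arr : List Int), Dom_canBeEqual target arr → Spec_canBeEqual target arr (canBeEqual target arr)

-- ===== LEMMAS AND PROOFS =====

theorem find?_filter_self (l : List (Int × Int)) (k : Int) :
    (l.filter (fun p => !(p.1 == k))).find? (fun p => p.1 == k) = none := by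
  induction l with
  | nil => simp
  | cons p rest ih =>
    by_cases h : p.1 = k
    · simpa [List.filter_cons, h] using ih
    · simp [List.filter_cons, h, List.find?_cons, ih]

theorem find?_filter_ne (l : List (Int × Int)) (k v : Int) (h : v ≠ k) :
    (l.filter (fun p => !(p.1 == k))).find? (fun p => p.1 == v) = l.find? (fun p => p.1 == v) := by
  induction l with
  | nil => simp
  | cons p rest ih =>
    by_cases h1 : p.1 = k
    · have hc1 : (p.1 == k) = true := by simp [h1]
      have hc2 : (p.1 == v) = false := by simp [h1, Ne.symm h]
      simp only [List.filter_cons, hc1, Bool.not_true, Bool.false_eq_true, if_false, ih,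
        List.find?_cons, hc2]
    · by_cases h2 : p.1 = v
      · simp [List.filter_cons, h1, List.find?_cons, h2, h]
      · have hk : (p.1 == v) = false := by simp [h2]
        simp [List.filter_cons, h1, List.find?_cons, h2, hk, h, ih]

theorem getD_erase_int (d : PySem.Dict Int Int) (k v : Int) :
    (d.erase k).getD v 0 = if v = k then 0 else d.getD v 0 := by
  rcases eq_or_ne v k with rfl | hvk
  · rw [if_pos rfl]
    simp only [PySem.Dict.erase, PySem.Dict.getD, PySem.Dict.get?]
    rw [find?_filter_self]
    rfl
  · simp [PySem.Dict.erase, PySem.Dict.getD, PySem.Dict.get?, find?_filter_ne d.items k v hvk, hvk]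

theorem getD_ne_zero_of_contains (d : PySem.Dict Int Int)
    (hnz : ∀ p ∈ d.items, p.2 ≠ (0 : Int)) (k : Int) (hc : d.contains k = true) :
    d.getD k 0 ≠ 0 := by
  simp only [PySem.Dict.contains, List.any_eq_true] at hc
  obtain ⟨p, hp, hpk⟩ := hc
  rcases h : d.items.find? (fun p => p.1 == k) with _ | q
  · exact absurd (List.find?_eq_none.mp h p hp) (by simp [hpk])
  · have hqm := List.mem_of_find?_eq_some h
    simp [PySem.Dict.getD, PySem.Dict.get?, h]
    exact hnz q hqm

theorem loop_iff (target : List Int) : ∀ d : PySem.Dict Int Int,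
    (∀ p ∈ d.items, p.2 ≠ (0 : Int)) →
    (canBeEqualLoop d target = true ↔ ∀ v : Int, d.getD v 0 = (target.count v : Int)) := by
  induction target with
  | nil =>
    intro d hnz
    simp only [canBeEqualLoop, beq_iff_eq, List.count_nil, Nat.cast_zero]
    constructor
    · intro hs v
      have : d.items = [] := List.length_eq_zero_iff.mp hs
      simp [PySem.Dict.getD, PySem.Dict.get?, this]
    · intro hv
      rcases h : d.items with _ | ⟨⟨k, w⟩, rest⟩
      · simp [PySem.Dict.size, h]
      · exfalso
        have := hv k
        simp [PySem.Dict.getD, PySem.Dict.get?, h, List.find?_cons] at this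
        exact hnz ⟨k, w⟩ (h ▸ List.mem_cons_self) this
  | cons t ts ih =>
    intro d hnz
    have hcount : ∀ v : Int, (((t :: ts).count v : Int)) = (ts.count v : Int) + (if v = t then 1 else 0) := by
      intro v
      rcases eq_or_ne v t with rfl | hvt
      · simp [List.count_cons]
      · simp [List.count_cons, hvt, Ne.symm hvt]
    simp only [canBeEqualLoop]
    cases hc : d.contains t with
    | false =>
      simp only [Bool.false_eq_true, if_false, false_iff]
      intro hv
      have h0 := PySem.Dict.getD_of_not_contains (d := d) (k := t) (d0 := (0:Int)) hc
      have h1 := hv t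
      rw [h0, hcount t, if_pos rfl] at h1
      omega
    | true =>
      have hv0 : d.getD t 0 ≠ 0 := getD_ne_zero_of_contains d hnz t hc
      simp only [if_pos rfl, if_true]
      set v0 : Int := d.getD t 0 with hv0def
      have hd2getD : ∀ v : Int, (d.insert t (v0 - 1)).getD v 0 = if v = t then v0 - 1 else d.getD v 0 :=
        fun v => PySem.Dict.getD_insert d t v (v0 - 1) 0
      have hd2nz : ∀ p ∈ (d.insert t (v0 - 1)).items, p.1 ≠ t → p.2 ≠ (0 : Int) := by
        intro p hp hpt
        rcases (PySem.Dict.mem_items_insert d t (v0 - 1) p).mp hp with h | ⟨h, _⟩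
        · exact absurd (by rw [h]) hpt
        · exact hnz p h
      by_cases hone : v0 = 1
      · have hz : ((d.insert t (v0 - 1)).getD t 0 == 0) = true := by
          simp [hd2getD t, hone]
        rw [hz, if_pos rfl]
        have herase : ∀ v : Int, ((d.insert t (v0 - 1)).erase t).getD v 0
            = if v = t then 0 else d.getD v 0 := by
          intro v
          rw [getD_erase_int]
          rcases eq_or_ne v t with rfl | hvt
          · simp
          · rw [if_neg hvt, if_neg hvt, hd2getD v, if_neg hvt]
        have hinz : ∀ p ∈ ((d.insert t (v0 - 1)).erase t).items, p.2 ≠ (0 : Int) := by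
          intro p hp
          simp only [PySem.Dict.erase, List.mem_filter] at hp
          obtain ⟨hp1, hp2⟩ := hp
          exact hd2nz p hp1 (by simpa using hp2)
        rw [ih _ hinz]
        constructor
        · intro hv v
          rw [hcount v]
          have h1 := hv v
          rw [herase v] at h1
          rcases eq_or_ne v t with rfl | hvt
          · rw [if_pos rfl] at h1 ⊢
            omega
          · rw [if_neg hvt] at h1 ⊢
            omega
        · intro hv v
          rw [herase v]
          have h1 := hv v
          rw [hcount v] at h1
          rcases eq_or_ne v t with rfl | hvt
          · rw [if_pos rfl] at h1 ⊢
            omega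
          · rw [if_neg hvt] at h1 ⊢
            omega
      · have hz : ((d.insert t (v0 - 1)).getD t 0 == 0) = false := by
          rw [hd2getD t, if_pos rfl]
          simp
          omega
        rw [hz]
        simp only [Bool.false_eq_true, if_false]
        have hinz : ∀ p ∈ (d.insert t (v0 - 1)).items, p.2 ≠ (0 : Int) := by
          intro p hp
          rcases (PySem.Dict.mem_items_insert d t (v0 - 1) p).mp hp with h | ⟨h, _⟩
          · rw [h]; simp; omega
          · exact hnz p h
        rw [ih _ hinz]
        constructor
        · intro hv v
          rw [hcount v]
          have h1 := hv v
          rw [hd2getD v] at h1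
          rcases eq_or_ne v t with rfl | hvt
          · rw [if_pos rfl] at h1 ⊢
            omega
          · rw [if_neg hvt] at h1 ⊢
            omega
        · intro hv v
          rw [hd2getD v]
          have h1 := hv v
          rw [hcount v] at h1
          rcases eq_or_ne v t with rfl | hvt
          · rw [if_pos rfl] at h1 ⊢
            omega
          · rw [if_neg hvt] at h1 ⊢
            omega

theorem canBeEqual_iff_perm (target arr : List Int) :
    canBeEqual target arr = true ↔ target.Perm arr := by
  unfold canBeEqual
  rw [PySem.Dict.foldl_insert_getD_add_one_eq_counter]
  have hnz : ∀ p ∈ (PySem.Dict.counter arr).items, p.2 ≠ (0 : Int) := by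
    intro p hp
    rw [PySem.Dict.items_counter] at hp
    obtain ⟨k, hk, rfl⟩ := List.mem_map.mp hp
    have hk' : k ∈ arr := (PySem.Set.mem_ofList arr k).mp hk
    have : 1 ≤ arr.count k := List.one_le_count_iff.mpr hk'
    simp
    omega
  rw [loop_iff target _ hnz, List.perm_iff_count]
  constructor
  · intro h v
    have := h v
    rw [PySem.Dict.getD_counter] at this
    exact_mod_cast this.symm
  · intro h v
    rw [PySem.Dict.getD_counter, h v]

theorem canBeEqual_alt_iff_perm (target arr : List Int) :
    canBeEqual_alt target arr = true ↔ target.Perm arr := by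
  unfold canBeEqual_alt
  rw [beq_iff_eq]
  exact PySem.List.sorted_id_eq_sorted_id_iff_perm target arr

-- ===== VERDICT (by name: the statement is the Claim_ definition above) =====
theorem canBeEqual_spec : Claim_equal_canBeEqual := by
  intro target arr _
  unfold Spec_canBeEqual
  rw [Bool.eq_iff_iff, canBeEqual_iff_perm, canBeEqual_alt_iff_perm]
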